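-- pv_equiv track=rewrite | github.com/oszypczy/hackaton | code/attacks/task3/features/paraphrase_robustness.py | _perturb_swap_adj
-- ===== SOURCE A (Python) =====
-- def _perturb_swap_adj(text: str) -> str:
--     words = text.split()
--     if len(words) < 4:
--         return text
--     out = list(words)
--     # Swap pairs of adjacent words at every other position
--     for i in range(0, len(out) - 1, 4):
--         out[i], out[i + 1] = out[i + 1], out[i]
--     return " ".join(out)
-- ===== SOURCE B (Python) =====
-- def _perturb_swap_adj(text: str) -> str:
--     words = text.split()
--     if len(words) < 4:
--         return text
--
--     def go(ws):
--         # transform chunks of 4 recursively: swap the first two words of the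
--         # chunk (only if the chunk has at least two), keep the next two as-is
--         if len(ws) < 2:
--             return ws
--         return ws[1:2] + ws[0:1] + ws[2:4] + go(ws[4:])
--
--     return " ".join(go(words))
-- ===== Notes on version B (the rewrite author's own statement) =====
-- stated objective: alternative
-- what changed: Replaces A's in-place swap loop over indices range(0, len-1, 4) with a recursive chunk decomposition: slice the word list into chunks of 4, swap the first two words of each chunk (skipped when fewer than two remain), and concatenate.
import Mathlib
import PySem

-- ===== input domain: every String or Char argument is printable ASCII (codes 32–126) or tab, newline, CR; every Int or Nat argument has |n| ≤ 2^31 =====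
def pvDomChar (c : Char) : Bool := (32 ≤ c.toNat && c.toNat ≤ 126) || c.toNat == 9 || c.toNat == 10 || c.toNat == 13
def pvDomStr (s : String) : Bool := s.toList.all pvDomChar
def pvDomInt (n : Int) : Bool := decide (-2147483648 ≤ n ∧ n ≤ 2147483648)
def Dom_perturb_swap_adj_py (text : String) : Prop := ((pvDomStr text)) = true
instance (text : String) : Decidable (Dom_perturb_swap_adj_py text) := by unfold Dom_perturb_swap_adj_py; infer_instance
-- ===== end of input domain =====

-- B rebuilds the word list from consecutive 4-word chunks (swapping the first two of
-- each chunk, slice-built recursively) instead of A's in-place index-stepping swap loop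
-- over range(0, len-1, 4); objective: alternative decomposition, same cost.

-- ===== PORT A =====
-- the loop body 'out[i], out[i+1] = out[i+1], out[i]': both reads are from the list as
-- it is before this iteration; i and i+1 are always in range for i ∈ range(0, len-1, 4),
-- so the total pyGetD/pySetD forms are exact here.
def pvSwapStep (acc : List String) (i : Int) : List String :=
  PySem.List.pySetD
    (PySem.List.pySetD acc i (PySem.List.pyGetD acc (i + 1) ""))
    (i + 1) (PySem.List.pyGetD acc i "")

def perturb_swap_adj_py (text : String) : String :=
  let words := PySem.Str.split₀ text
  if words.length < 4 then text
  else
    let out := words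
    let out := (PySem.List.pyRange 0 ((out.length : Int) - 1) 4).foldl pvSwapStep out
    PySem.Str.join " " out

-- ===== PORT B =====
-- go(ws) = ws[1:2] + ws[0:1] + ws[2:4] + go(ws[4:])  (chunk of 4, swap its first two)
def pvGo (ws : List String) : List String :=
  if ws.length < 2 then ws
  else
    PySem.List.slice ws (some 1) (some 2) ++ PySem.List.slice ws (some 0) (some 1) ++
      PySem.List.slice ws (some 2) (some 4) ++ pvGo (PySem.List.slice ws (some 4) none)
termination_by ws.length
decreasing_by
  rw [PySem.List.slice_from ws (a := 4) (by norm_num)]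
  simp only [List.length_drop]; omega

def perturb_swap_adj_py_alt (text : String) : String :=
  let words := PySem.Str.split₀ text
  if words.length < 4 then text
  else PySem.Str.join " " (pvGo words)

-- ===== PRECONDITION & SPEC =====
def Spec_perturb_swap_adj_py (text : String) (out : String) : Prop := out = perturb_swap_adj_py_alt text
instance (text : String) (out : String) : Decidable (Spec_perturb_swap_adj_py text out) := by unfold Spec_perturb_swap_adj_py; infer_instance

-- ===== CLAIM (what is proved, stated in full; the proofs are below) =====
def Claim_equal_perturb_swap_adj_py : Prop := ∀ (text : String), Dom_perturb_swap_adj_py text → Spec_perturb_swap_adj_py text (perturb_swap_adj_py text)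

-- ===== LEMMAS AND PROOFS =====

-- B's slices, rewritten as take/drop
lemma pvSlice12 (ws : List String) : PySem.List.slice ws (some 1) (some 2) = (ws.drop 1).take 1 := by
  rw [show (1:Int) = ((1:Nat):Int) by norm_num, show (2:Int) = ((2:Nat):Int) by norm_num,
      PySem.List.slice_natCast]
lemma pvSlice01 (ws : List String) : PySem.List.slice ws (some 0) (some 1) = ws.take 1 := by
  rw [show (0:Int) = ((0:Nat):Int) by norm_num, show (1:Int) = ((1:Nat):Int) by norm_num,
      PySem.List.slice_natCast]
  simp
lemma pvSlice24 (ws : List String) : PySem.List.slice ws (some 2) (some 4) = (ws.drop 2).take 2 := by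
  rw [show (2:Int) = ((2:Nat):Int) by norm_num, show (4:Int) = ((4:Nat):Int) by norm_num,
      PySem.List.slice_natCast]
lemma pvSlice4 (ws : List String) : PySem.List.slice ws (some 4) none = ws.drop 4 := by
  rw [show (4:Int) = ((4:Nat):Int) by norm_num, PySem.List.slice_from_natCast]

lemma pvGo_short (ws : List String) (h : ws.length < 2) : pvGo ws = ws := by
  rw [pvGo, if_pos h]

lemma pvGo_cons (a b : String) (t : List String) :
    pvGo (a :: b :: t) = b :: a :: (t.take 2 ++ pvGo (t.drop 2)) := by
  rw [pvGo, if_neg (by simp)]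
  rw [pvSlice12, pvSlice01, pvSlice24, pvSlice4]
  simp

-- one swap of A's loop, at index = length of the already-processed prefix
lemma pvSwapStep_at (pre : List String) (a b : String) (t : List String) :
    pvSwapStep (pre ++ a :: b :: t) (pre.length : Int) = pre ++ b :: a :: t := by
  unfold pvSwapStep
  have h1 : ((pre.length : Int) + 1) = ((pre.length + 1 : Nat) : Int) := by push_cast; ring
  rw [h1, PySem.List.pyGetD_natCast, PySem.List.pyGetD_natCast,
      PySem.List.pySetD_natCast, PySem.List.pySetD_natCast]
  have g1 : (pre ++ a :: b :: t).getD pre.length "" = a := by simp [List.getD]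
  have g2 : (pre ++ a :: b :: t).getD (pre.length + 1) "" = b := by simp [List.getD]
  rw [g1, g2, List.set_append_right _ _ (le_refl pre.length)]
  simp

-- induction forms of range(a, b, 4)
lemma pvRange4_nil {a b : Int} (h : b ≤ a) : PySem.List.pyRange a b 4 = [] := by
  rw [PySem.List.pyRange_of_pos a b (by norm_num), if_neg (by omega)]
  simp

lemma pvRange4_cons {a b : Int} (h : a < b) :
    PySem.List.pyRange a b 4 = a :: PySem.List.pyRange (a + 4) b 4 := by
  rw [PySem.List.pyRange_of_pos a b (by norm_num), PySem.List.pyRange_of_pos (a+4) b (by norm_num)]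
  rw [if_pos h]
  by_cases h4 : a + 4 < b
  · rw [if_pos h4]
    have key : ((b - a + 4 - 1) / 4).toNat = ((b - (a+4) + 4 - 1) / 4).toNat + 1 := by omega
    rw [key, List.range_succ_eq_map]
    simp only [List.map_cons, List.map_map]
    congr 1
    · push_cast; ring
    · apply List.map_congr_left
      intro k _
      simp only [Function.comp_apply]
      push_cast
      ring
  · rw [if_neg h4]
    have key : ((b - a + 4 - 1) / 4).toNat = 1 := by omega
    rw [key]
    simp

-- A's swap loop, started after a processed prefix 'pre', equals B's chunk recursion on
-- the unprocessed suffix 'ws'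
lemma pvLoop_eq (ws : List String) : ∀ pre : List String,
    (PySem.List.pyRange (pre.length : Int) ((pre.length : Int) + (ws.length : Int) - 1) 4).foldl
      pvSwapStep (pre ++ ws) = pre ++ pvGo ws := by
  induction ws using pvGo.induct with
  | case1 ws h =>
    intro pre
    rw [pvRange4_nil (by omega), pvGo_short ws h]
    rfl
  | case2 ws h ih =>
    intro pre
    obtain ⟨a, b, t, rfl⟩ : ∃ a b t, ws = a :: b :: t := by
      rcases ws with _ | ⟨a, _ | ⟨b, t⟩⟩
      · simp at h
      · simp at h
      · exact ⟨a, b, t, rfl⟩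
    rw [pvSlice4] at ih
    rw [pvRange4_cons (by simp; omega)]
    rw [List.foldl_cons, pvSwapStep_at, pvGo_cons]
    by_cases ht : t.length < 2
    · rw [pvRange4_nil (by simp; omega)]
      rw [pvGo_short _ (by simp only [List.length_drop]; omega),
          List.take_of_length_le (by omega), List.drop_eq_nil_of_le (by omega)]
      simp
    · obtain ⟨c, d, u, rfl⟩ : ∃ c d u, t = c :: d :: u := by
        rcases t with _ | ⟨c, _ | ⟨d, u⟩⟩
        · simp at ht
        · simp at ht
        · exact ⟨c, d, u, rfl⟩
      have ihu := ih (pre ++ [b, a, c, d])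
      simp only [List.drop_succ_cons, List.drop_zero] at ihu
      have e1 : ((pre ++ [b, a, c, d]).length : Int) = (pre.length : Int) + 4 := by
        simp only [List.length_append, List.length_cons, List.length_nil]; push_cast; ring
      have e2 : (pre ++ [b, a, c, d]) ++ u = pre ++ b :: a :: c :: d :: u := by simp
      rw [e1, e2] at ihu
      have e4 : (pre.length : Int) + ((a :: b :: c :: d :: u).length : Int) - 1
          = (pre.length : Int) + 4 + (u.length : Int) - 1 := by
        simp only [List.length_cons]; push_cast; ring
      rw [e4, ihu]
      simp

theorem perturb_swap_adj_py_eq_alt (text : String) :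
    perturb_swap_adj_py text = perturb_swap_adj_py_alt text := by
  unfold perturb_swap_adj_py perturb_swap_adj_py_alt
  by_cases h : (PySem.Str.split₀ text).length < 4
  · simp only [if_pos h]
  · simp only [if_neg h]
    have := pvLoop_eq (PySem.Str.split₀ text) []
    simp only [List.length_nil, Nat.cast_zero, zero_add, List.nil_append] at this
    rw [this]

-- ===== VERDICT (by name: the statement is the Claim_ definition above) =====
theorem perturb_swap_adj_py_spec : Claim_equal_perturb_swap_adj_py := by
  intro text _
  exact perturb_swap_adj_py_eq_alt text
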